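-- pv_equiv track=rewrite | github.com/kokoko12334/TIL2 | Algorithm/python/baekjoon/1146.py | zigzag_permutations
-- ===== SOURCE A (Python) =====
-- MOD = 1000000
--
-- def zigzag_permutations(N):
--     # Up과 Down 배열 초기화
--     Up = [[0] * (N + 1) for _ in range(N + 1)]
--     Down = [[0] * (N + 1) for _ in range(N + 1)]
--
--     # 길이 1인 순열의 초기값 설정 (첫 번째 수가 a인 경우)
--     for i in range(1, N + 1):
--         Up[1][i] = 1
--         Down[1][i] = 1
--
--     # DP 테이블 채우기
--     for n in range(3, N + 1, 2):  # 길이 n에 대해 계산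
--         for a in range(1, N + 1):  # 첫 번째 수 a에 대해
--             for b in range(a + 1, N + 1):  # b는 a보다 큰 수
--                 for i in range(1, b - 1):  # b 다음에 올 수 있는 수
--                     Up[n][a] = (Up[n][a] + Up[n - 2][i]) % MOD
--
--     # 최종 결과 계산
--     result = 0
--     for i in range(1, N):  # Up의 경우
--         result = (result + Up[N][i]) % MOD
--
--     for i in range(2, N + 1):  # Down의 경우
--         result = (result + Down[N][i]) % MOD
--
--     return result
-- ===== SOURCE B (Python) =====
-- MOD = 1000000
--
-- def zigzag_permutations(N):
--     # Layered DP with prefix sums: each Up row is computed in O(N) from the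
--     # previous row's prefix sums, instead of A's O(N^3) triple loop per row.
--     if N < 3 or N % 2 == 0:
--         return 0
--     prev = [0] + [1] * N          # prev[i] = Up[1][i]
--     for _ in range(3, N + 1, 2):
--         pref = [0]                # pref[k] = sum(prev[1..k]) mod MOD
--         for i in range(1, N + 1):
--             pref.append((pref[-1] + prev[i]) % MOD)
--         cur = [0] * (N + 1)
--         acc = 0
--         for a in range(N - 1, 0, -1):   # cur[a] = sum over b>a of pref[b-2]
--             acc = (acc + pref[a - 1]) % MOD
--             cur[a] = acc
--         prev = cur
--     result = 0
--     for i in range(1, N):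
--         result = (result + prev[i]) % MOD
--     return result
-- ===== Notes on version B (the rewrite author's own statement) =====
-- stated objective: faster
-- what changed: Replaces A's quadruple loop (for each row and each a, an inner b,i double scan of the previous row) by prefix sums of the previous row plus a single running suffix accumulator, computing each DP row in O(N); rows of even index and the all-zero Down table are skipped since they contribute nothing.
import Mathlib
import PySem

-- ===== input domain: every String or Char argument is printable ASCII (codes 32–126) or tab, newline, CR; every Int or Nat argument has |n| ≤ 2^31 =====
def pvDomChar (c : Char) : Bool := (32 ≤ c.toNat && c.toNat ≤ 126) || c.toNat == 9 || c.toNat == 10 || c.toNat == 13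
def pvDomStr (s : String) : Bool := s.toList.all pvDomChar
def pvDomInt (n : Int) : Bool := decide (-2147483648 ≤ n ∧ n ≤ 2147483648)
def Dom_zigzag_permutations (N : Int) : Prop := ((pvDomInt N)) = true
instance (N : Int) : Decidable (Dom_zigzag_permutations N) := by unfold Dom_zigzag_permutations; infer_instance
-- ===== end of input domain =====

-- B replaces A's per-row O(N^3) triple loop by prefix sums of the previous row
-- plus one running accumulator (objective: faster).

-- ===== PORT A =====
-- grid helpers: Up[r][c] read / write
def pvGet2 (g : List (List Int)) (r c : Nat) : Int := (g.getD r []).getD c 0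

def pvSet2 (g : List (List Int)) (r c : Nat) (v : Int) : List (List Int) :=
  g.set r ((g.getD r []).set c v)

def zigzag_permutations (N : Int) : Int :=
  let rows := (N + 1).toNat
  let Up0 : List (List Int) := List.replicate rows (List.replicate rows 0)
  let Down0 : List (List Int) := List.replicate rows (List.replicate rows 0)
  let Up1 := (PySem.List.pyRange 1 (N + 1) 1).foldl (fun U i => pvSet2 U 1 i.toNat 1) Up0
  let Down1 := (PySem.List.pyRange 1 (N + 1) 1).foldl (fun D i => pvSet2 D 1 i.toNat 1) Down0
  let Up2 := (PySem.List.pyRange 3 (N + 1) 2).foldl (fun U n =>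
      (PySem.List.pyRange 1 (N + 1) 1).foldl (fun U a =>
        (PySem.List.pyRange (a + 1) (N + 1) 1).foldl (fun U b =>
          (PySem.List.pyRange 1 (b - 1) 1).foldl (fun U i =>
            pvSet2 U n.toNat a.toNat
              (PySem.Int.mod (pvGet2 U n.toNat a.toNat + pvGet2 U (n - 2).toNat i.toNat) 1000000)) U) U) U) Up1
  let result0 := (PySem.List.pyRange 1 N 1).foldl
      (fun r i => PySem.Int.mod (r + pvGet2 Up2 N.toNat i.toNat) 1000000) 0
  let result1 := (PySem.List.pyRange 2 (N + 1) 1).foldl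
      (fun r i => PySem.Int.mod (r + pvGet2 Down1 N.toNat i.toNat) 1000000) result0
  result1

-- ===== PORT B =====
-- next DP row from the previous one: prefix sums, then one running accumulator
def pvBLayer (N : Int) (prev : List Int) : List Int :=
  let pref := (PySem.List.pyRange 1 (N + 1) 1).foldl
      (fun pref i => pref ++ [PySem.Int.mod (pref.getLastD 0 + prev.getD i.toNat 0) 1000000]) [0]
  let st := (PySem.List.pyRange (N - 1) 0 (-1)).foldl
      (fun (st : Int × List Int) a =>
        let acc := PySem.Int.mod (st.1 + pref.getD (a - 1).toNat 0) 1000000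
        (acc, st.2.set a.toNat acc))
      (0, List.replicate (N.toNat + 1) 0)
  st.2

def zigzag_permutations_alt (N : Int) : Int :=
  if N < 3 ∨ PySem.Int.mod N 2 = 0 then 0
  else
    let prevF := (PySem.List.pyRange 3 (N + 1) 2).foldl
        (fun prev _ => pvBLayer N prev) (0 :: List.replicate N.toNat 1)
    (PySem.List.pyRange 1 N 1).foldl
      (fun r i => PySem.Int.mod (r + prevF.getD i.toNat 0) 1000000) 0

-- ===== PRECONDITION & SPEC =====
def Spec_zigzag_permutations (N : Int) (out : Int) : Prop := out = zigzag_permutations_alt N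
instance (N : Int) (out : Int) : Decidable (Spec_zigzag_permutations N out) := by unfold Spec_zigzag_permutations; infer_instance

-- ===== CLAIM (what is proved, stated in full; the proofs are below) =====
def Claim_equal_zigzag_permutations : Prop := ∀ (N : Int), Dom_zigzag_permutations N → Spec_zigzag_permutations N (zigzag_permutations N)

-- ===== LEMMAS AND PROOFS =====

-- Python's '%' by a positive literal is Lean's emod
theorem pvmod (x : Int) : PySem.Int.mod x 1000000 = x % 1000000 :=
  PySem.Int.mod_eq_emod_of_pos (by norm_num)

theorem pvmod2 (x : Int) : PySem.Int.mod x 2 = x % 2 :=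
  PySem.Int.mod_eq_emod_of_pos (by norm_num)

-- ---------- pure spec functions ----------

-- sum of p 1 .. p k
def sum1 (p : Nat → Int) (k : Nat) : Int := ((List.range k).map (fun i => p (i + 1))).sum

-- inner i-loop total for a given b
def pvInner (p : Nat → Int) (b : Int) : Int :=
  ((PySem.List.pyRange 1 (b - 1) 1).map (fun i => p i.toNat)).sum

-- value A stores into cell (n, c)
def pvAval (N : Int) (p : Nat → Int) (c : Nat) : Int :=
  (((PySem.List.pyRange ((c : Int) + 1) (N + 1) 1).map (fun b => pvInner p b)).sum) % 1000000

-- reduced prefix sums (B's pref entries)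
def pvQ (p : Nat → Int) (j : Nat) : Int := sum1 p j % 1000000

-- B's suffix sum of pref[c-1 .. a-1]
def pvSS (pref : List Int) (c : Nat) (a : Int) : Int :=
  ((List.range (a.toNat + 1 - c)).map (fun j => pref.getD (c - 1 + j) 0)).sum

def pvShape (G : List (List Int)) (s : Nat) : Prop :=
  G.length = s ∧ ∀ r : Nat, r < s → (G.getD r []).length = s

-- A's outer-loop body, named for the lemmas (same lambda as in the port)
def pvABody (N : Int) (U : List (List Int)) (n : Int) : List (List Int) :=
  (PySem.List.pyRange 1 (N + 1) 1).foldl (fun U a =>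
    (PySem.List.pyRange (a + 1) (N + 1) 1).foldl (fun U b =>
      (PySem.List.pyRange 1 (b - 1) 1).foldl (fun U i =>
        pvSet2 U n.toNat a.toNat
          (PySem.Int.mod (pvGet2 U n.toNat a.toNat + pvGet2 U (n - 2).toNat i.toNat) 1000000)) U) U) U

-- ---------- step-2 range lemmas ----------

theorem pyRange_two_eq_nil {a b : Int} (h : b ≤ a) : PySem.List.pyRange a b 2 = [] := by
  rw [PySem.List.pyRange_of_pos _ _ (by norm_num)]
  simp [show ¬ a < b from by omega]

theorem pyRange_two_cons {a b : Int} (h : a < b) :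
    PySem.List.pyRange a b 2 = a :: PySem.List.pyRange (a + 2) b 2 := by
  rw [PySem.List.pyRange_of_pos _ _ (by norm_num), PySem.List.pyRange_of_pos _ _ (by norm_num)]
  have hk : (if a < b then ((b - a + 2 - 1) / 2).toNat else 0)
      = (if a + 2 < b then ((b - (a + 2) + 2 - 1) / 2).toNat else 0) + 1 := by
    split_ifs <;> omega
  rw [hk, List.range_succ_eq_map, List.map_cons, List.map_map]
  congr 1
  · norm_num
  · apply List.map_congr_left
    intro k _
    simp only [Function.comp_def]
    push_cast
    ring

theorem mem_pyRange_two {a b x : Int} (h : x ∈ PySem.List.pyRange a b 2) :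
    a ≤ x ∧ x < b ∧ 2 ∣ x - a :=
  (PySem.List.mem_pyRange_iff_of_pos (by norm_num) x).mp h

-- ---------- grid get/set lemmas ----------

theorem pvGetD_set_self' {α : Type} (l : List α) (i : Nat) (v d : α) (h : i < l.length) :
    (l.set i v).getD i d = v := by
  simp [List.getD_eq_getElem?_getD, List.getElem?_set_self h]

theorem pvGetD_set_ne {α : Type} (l : List α) (i j : Nat) (v : α) (d : α) (h : i ≠ j) :
    (l.set i v).getD j d = l.getD j d := by
  simp [List.getD_eq_getElem?_getD, List.getElem?_set_ne h]

theorem pvGet2_set_ne_row (G : List (List Int)) (r c : Nat) (v : Int) (r' c' : Nat)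
    (h : r ≠ r') : pvGet2 (pvSet2 G r c v) r' c' = pvGet2 G r' c' := by
  unfold pvGet2 pvSet2
  rw [pvGetD_set_ne _ _ _ _ _ h]

theorem pvGet2_set_ne_col (G : List (List Int)) (r c : Nat) (v : Int) (c' : Nat)
    (h : c ≠ c') : pvGet2 (pvSet2 G r c v) r c' = pvGet2 G r c' := by
  unfold pvGet2 pvSet2
  by_cases hr : r < G.length
  · rw [pvGetD_set_self' _ _ _ _ hr, pvGetD_set_ne _ _ _ _ _ h]
  · rw [List.set_eq_of_length_le (by omega)]

theorem pvGet2_set_self (G : List (List Int)) (r c : Nat) (v : Int)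
    (hr : r < G.length) (hc : c < (G.getD r []).length) :
    pvGet2 (pvSet2 G r c v) r c = v := by
  unfold pvGet2 pvSet2
  rw [pvGetD_set_self' _ _ _ _ hr, pvGetD_set_self' _ _ _ _ hc]

theorem pvSet2_set2 (G : List (List Int)) (r c : Nat) (v w : Int) :
    pvSet2 (pvSet2 G r c v) r c w = pvSet2 G r c w := by
  unfold pvSet2
  by_cases hr : r < G.length
  · rw [pvGetD_set_self' _ _ _ _ hr, List.set_set, List.set_set]
  · have hG : G.set r ((G.getD r []).set c v) = G := List.set_eq_of_length_le (by omega)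
    rw [hG]

theorem pvSet2_self (G : List (List Int)) (r c : Nat)
    (hr : r < G.length) (hc : c < (G.getD r []).length) :
    pvSet2 G r c (pvGet2 G r c) = G := by
  unfold pvSet2 pvGet2
  have e2 : (G.getD r []).getD c 0 = (G.getD r [])[c] := by
    rw [List.getD_eq_getElem?_getD, List.getElem?_eq_getElem hc]; rfl
  rw [e2, List.set_getElem_self hc]
  have e1 : G.getD r [] = G[r] := by
    rw [List.getD_eq_getElem?_getD, List.getElem?_eq_getElem hr]; rfl
  rw [e1, List.set_getElem_self hr]

theorem pvSet2_length (G : List (List Int)) (r c : Nat) (v : Int) :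
    (pvSet2 G r c v).length = G.length := by
  simp [pvSet2]

theorem pvSet2_row_length (G : List (List Int)) (r c : Nat) (v : Int) (r' : Nat) :
    ((pvSet2 G r c v).getD r' []).length = (G.getD r' []).length := by
  unfold pvSet2
  by_cases h : r = r'
  · subst h
    by_cases hr : r < G.length
    · rw [pvGetD_set_self' _ _ _ _ hr, List.length_set]
    · rw [List.set_eq_of_length_le (by omega)]
  · rw [pvGetD_set_ne _ _ _ _ _ h]

theorem pvShape_set (G : List (List Int)) (s : Nat) (r c : Nat) (v : Int)
    (h : pvShape G s) : pvShape (pvSet2 G r c v) s := by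
  obtain ⟨h1, h2⟩ := h
  exact ⟨by rw [pvSet2_length]; exact h1,
    fun r' hr' => by rw [pvSet2_row_length]; exact h2 r' hr'⟩

theorem pvGet2_replicate (s r c : Nat) :
    pvGet2 (List.replicate s (List.replicate s (0 : Int))) r c = 0 := by
  unfold pvGet2
  have hin : ∀ c : Nat, (List.replicate s (0 : Int)).getD c 0 = 0 := by
    intro c
    rw [List.getD_eq_getElem?_getD, List.getElem?_replicate]
    split_ifs <;> rfl
  by_cases h : r < s
  · rw [List.getD_eq_getElem?_getD (l := List.replicate s (List.replicate s 0)),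
      List.getElem?_replicate, if_pos h]
    exact hin c
  · rw [List.getD_eq_getElem?_getD (l := List.replicate s (List.replicate s 0)),
      List.getElem?_replicate, if_neg h]
    rfl

theorem pvShape_replicate (s : Nat) :
    pvShape (List.replicate s (List.replicate s (0 : Int))) s := by
  refine ⟨by simp, fun r hr => ?_⟩
  rw [List.getD_eq_getElem?_getD, List.getElem?_replicate]
  simp [hr]

-- ---------- generic fold preservation ----------

theorem pvShape_foldl {α : Type} (L : List α) (f : List (List Int) → α → List (List Int))
    (s : Nat) (h : ∀ U x, pvShape U s → pvShape (f U x) s) :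
    ∀ U, pvShape U s → pvShape (L.foldl f U) s := by
  induction L with
  | nil => intro U hU; exact hU
  | cons x L ih => intro U hU; exact ih _ (h U x hU)

theorem pvGet2_foldl_preserve {α : Type} (L : List α) (f : List (List Int) → α → List (List Int))
    (r c : Nat) :
    ∀ U, (∀ U x, x ∈ L → pvGet2 (f U x) r c = pvGet2 U r c) →
      pvGet2 (L.foldl f U) r c = pvGet2 U r c := by
  induction L with
  | nil => intro U _; rfl
  | cons x L ih =>
      intro U h
      rw [List.foldl_cons, ih _ (fun U y hy => h U y (List.mem_cons_of_mem _ hy)),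
        h U x List.mem_cons_self]

-- ---------- mod-fold lemmas ----------

theorem pvFoldMod {α : Type} (L : List α) (g : α → Int) :
    ∀ x : Int, L.foldl (fun r y => (r + g y) % 1000000) (x % 1000000)
      = (x + (L.map g).sum) % 1000000 := by
  induction L with
  | nil => intro x; simp
  | cons a L ih =>
      intro x
      rw [List.foldl_cons, Int.emod_add_emod, ih (x + g a)]
      simp [add_assoc]

theorem pvSumMod (L : List Int) :
    ((L.map (fun x => x % 1000000)).sum) % 1000000 = L.sum % 1000000 := by
  induction L with
  | nil => rfl
  | cons a L ih =>
      simp only [List.map_cons, List.sum_cons]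
      rw [Int.add_emod, Int.emod_emod_of_dvd _ dvd_rfl, ih, ← Int.add_emod]

theorem sum1_succ (p : Nat → Int) (k : Nat) : sum1 p (k + 1) = sum1 p k + p (k + 1) := by
  simp [sum1, List.range_succ]

-- ---------- A side: collapsing the nested loops ----------

theorem pvILoop (nn mm : Nat) (hne : mm ≠ nn) (L : List Int) :
    ∀ (U : List (List Int)) (aa : Nat), nn < U.length → aa < (U.getD nn []).length →
    L.foldl (fun U i => pvSet2 U nn aa ((pvGet2 U nn aa + pvGet2 U mm i.toNat) % 1000000)) U
      = pvSet2 U nn aa (L.foldl (fun v i => (v + pvGet2 U mm i.toNat) % 1000000) (pvGet2 U nn aa)) := by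
  induction L with
  | nil => intro U aa h1 h2; rw [List.foldl_nil, List.foldl_nil, pvSet2_self _ _ _ h1 h2]
  | cons i L ih =>
      intro U aa h1 h2
      rw [List.foldl_cons, List.foldl_cons]
      have hlen : nn < (pvSet2 U nn aa ((pvGet2 U nn aa + pvGet2 U mm i.toNat) % 1000000)).length := by
        rw [pvSet2_length]; exact h1
      have hrow : aa < ((pvSet2 U nn aa ((pvGet2 U nn aa + pvGet2 U mm i.toNat) % 1000000)).getD nn []).length := by
        rw [pvSet2_row_length]; exact h2
      rw [ih _ _ hlen hrow]
      rw [pvGet2_set_self _ _ _ _ h1 h2, pvSet2_set2]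
      congr 1
      apply PySem.List.foldl_congr_mem
      intro acc x _
      rw [pvGet2_set_ne_row _ _ _ _ _ _ (Ne.symm hne)]

theorem pvBLoop (nn mm : Nat) (hne : mm ≠ nn) (L : List Int) :
    ∀ (U : List (List Int)) (aa : Nat), nn < U.length → aa < (U.getD nn []).length →
    L.foldl (fun U b => (PySem.List.pyRange 1 (b - 1) 1).foldl
        (fun U i => pvSet2 U nn aa ((pvGet2 U nn aa + pvGet2 U mm i.toNat) % 1000000)) U) U
      = pvSet2 U nn aa (L.foldl (fun v b => (PySem.List.pyRange 1 (b - 1) 1).foldl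
          (fun v i => (v + pvGet2 U mm i.toNat) % 1000000) v) (pvGet2 U nn aa)) := by
  induction L with
  | nil => intro U aa h1 h2; rw [List.foldl_nil, List.foldl_nil, pvSet2_self _ _ _ h1 h2]
  | cons b L ih =>
      intro U aa h1 h2
      rw [List.foldl_cons, List.foldl_cons]
      rw [pvILoop nn mm hne _ _ _ h1 h2]
      have hlen : nn < (pvSet2 U nn aa ((PySem.List.pyRange 1 (b - 1) 1).foldl
          (fun v i => (v + pvGet2 U mm i.toNat) % 1000000) (pvGet2 U nn aa))).length := by
        rw [pvSet2_length]; exact h1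
      have hrow : aa < ((pvSet2 U nn aa ((PySem.List.pyRange 1 (b - 1) 1).foldl
          (fun v i => (v + pvGet2 U mm i.toNat) % 1000000) (pvGet2 U nn aa))).getD nn []).length := by
        rw [pvSet2_row_length]; exact h2
      rw [ih _ _ hlen hrow]
      rw [pvGet2_set_self _ _ _ _ h1 h2, pvSet2_set2]
      congr 1
      apply PySem.List.foldl_congr_mem
      intro acc x _
      apply PySem.List.foldl_congr_mem
      intro acc' y _
      rw [pvGet2_set_ne_row _ _ _ _ _ _ (Ne.symm hne)]

theorem pvValFold (p : Nat → Int) (L : List Int) :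
    ∀ x : Int, L.foldl (fun v b => (PySem.List.pyRange 1 (b - 1) 1).foldl
        (fun v i => (v + p i.toNat) % 1000000) v) (x % 1000000)
      = (x + (L.map (fun b => pvInner p b)).sum) % 1000000 := by
  induction L with
  | nil => intro x; simp
  | cons b L ih =>
      intro x
      rw [List.foldl_cons, pvFoldMod,
        show (List.map (fun i => p i.toNat) (PySem.List.pyRange 1 (b - 1) 1)).sum = pvInner p b from rfl,
        ih (x + pvInner p b)]
      simp [add_assoc]

theorem pvALayer (N : Int) (nn mm : Nat) (hne : mm ≠ nn) (hnn : nn < (N + 1).toNat) :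
    ∀ (k : Nat) (a : Int), (N + 1 - a).toNat = k → 1 ≤ a →
    ∀ (U : List (List Int)), pvShape U (N + 1).toNat →
    (∀ c : Nat, a ≤ (c : Int) → pvGet2 U nn c = 0) →
    ∀ (r c : Nat),
    pvGet2 ((PySem.List.pyRange a (N + 1) 1).foldl (fun U a =>
        (PySem.List.pyRange (a + 1) (N + 1) 1).foldl (fun U b =>
          (PySem.List.pyRange 1 (b - 1) 1).foldl (fun U i =>
            pvSet2 U nn a.toNat ((pvGet2 U nn a.toNat + pvGet2 U mm i.toNat) % 1000000)) U) U) U) r c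
      = if r = nn ∧ a ≤ (c : Int) ∧ (c : Int) ≤ N
        then pvAval N (fun i => pvGet2 U mm i) c
        else pvGet2 U r c := by
  intro k
  induction k with
  | zero =>
      intro a hk ha U hU hz r c
      rw [PySem.List.pyRange_one_eq_nil (by omega), List.foldl_nil]
      rw [if_neg (by rintro ⟨_, h1, h2⟩; omega)]
  | succ k ih =>
      intro a hk ha U hU hz r c
      have hlt : a < N + 1 := by omega
      rw [PySem.List.pyRange_one_cons hlt, List.foldl_cons]
      have h1 : nn < U.length := by rw [hU.1]; exact hnn
      have hrow : a.toNat < (U.getD nn []).length := by rw [hU.2 nn hnn]; omega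
      rw [pvBLoop nn mm hne _ _ _ h1 hrow]
      have hc0 : pvGet2 U nn a.toNat = 0 := hz a.toNat (by omega)
      rw [hc0]
      have hvf := pvValFold (fun i => pvGet2 U mm i) (PySem.List.pyRange (a + 1) (N + 1) 1) 0
      rw [Int.zero_emod] at hvf
      rw [hvf]
      have haa : ((a.toNat : Nat) : Int) = a := by omega
      have hval : ((0 : Int) + ((PySem.List.pyRange (a + 1) (N + 1) 1).map
            (fun b => pvInner (fun i => pvGet2 U mm i) b)).sum) % 1000000
          = pvAval N (fun i => pvGet2 U mm i) a.toNat := by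
        rw [zero_add]; unfold pvAval; rw [haa]
      rw [hval]
      set v := pvAval N (fun i => pvGet2 U mm i) a.toNat with hv
      have hsh1 : pvShape (pvSet2 U nn a.toNat v) (N + 1).toNat := pvShape_set _ _ _ _ _ hU
      have hz1 : ∀ c : Nat, a + 1 ≤ (c : Int) → pvGet2 (pvSet2 U nn a.toNat v) nn c = 0 := by
        intro c hc
        rw [pvGet2_set_ne_col _ _ _ _ _ (by omega), hz c (by omega)]
      rw [ih (a + 1) (by omega) (by omega) _ hsh1 hz1 r c]
      have hp : (fun i => pvGet2 (pvSet2 U nn a.toNat v) mm i) = (fun i => pvGet2 U mm i) :=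
        funext fun i => pvGet2_set_ne_row _ _ _ _ _ _ (Ne.symm hne)
      rw [hp]
      by_cases hcond : r = nn ∧ a + 1 ≤ (c : Int) ∧ (c : Int) ≤ N
      · rw [if_pos hcond, if_pos ⟨hcond.1, by omega, hcond.2.2⟩]
      · rw [if_neg hcond]
        by_cases hr : r = nn
        · subst hr
          by_cases hceq : c = a.toNat
          · subst hceq
            rw [pvGet2_set_self _ _ _ _ h1 hrow, if_pos ⟨rfl, by omega, by omega⟩]
          · rw [pvGet2_set_ne_col _ _ _ _ _ (fun he => hceq he.symm)]
            rw [if_neg (by rintro ⟨_, hx1, hx2⟩; exact hcond ⟨rfl, by omega, hx2⟩)]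
        · rw [pvGet2_set_ne_row _ _ _ _ _ _ (fun he => hr he.symm)]
          rw [if_neg (fun hx => hr hx.1)]

theorem pvABody_eq (N : Int) (n : Int) (hn : 3 ≤ n) (hnN : n ≤ N)
    (U : List (List Int)) (hU : pvShape U (N + 1).toNat)
    (hz : ∀ c : Nat, 1 ≤ (c : Int) → pvGet2 U n.toNat c = 0) :
    ∀ (r c : Nat),
    pvGet2 (pvABody N U n) r c
      = if r = n.toNat ∧ 1 ≤ (c : Int) ∧ (c : Int) ≤ N
        then pvAval N (fun i => pvGet2 U (n - 2).toNat i) c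
        else pvGet2 U r c := by
  intro r c
  unfold pvABody
  simp only [pvmod]
  exact pvALayer N n.toNat (n - 2).toNat (by omega) (by omega) N.toNat 1 (by omega)
    (by norm_num) U hU hz r c

theorem pvABody_shape (N n : Int) (U : List (List Int)) (s : Nat)
    (h : pvShape U s) : pvShape (pvABody N U n) s := by
  unfold pvABody
  refine pvShape_foldl _ _ _ (fun U a hU => ?_) U h
  refine pvShape_foldl _ _ _ (fun U b hU => ?_) U hU
  refine pvShape_foldl _ _ _ (fun U i hU => pvShape_set _ _ _ _ _ hU) U hU

theorem pvABody_preserve (N n : Int) (r c : Nat) (h : n.toNat ≠ r) (U : List (List Int)) :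
    pvGet2 (pvABody N U n) r c = pvGet2 U r c := by
  unfold pvABody
  refine pvGet2_foldl_preserve _ _ _ _ U (fun U a _ => ?_)
  refine pvGet2_foldl_preserve _ _ _ _ U (fun U b _ => ?_)
  refine pvGet2_foldl_preserve _ _ _ _ U (fun U i _ => ?_)
  exact pvGet2_set_ne_row _ _ _ _ _ _ h

-- the init loop Up[1][i] = 1 / Down[1][i] = 1
theorem pvInitLayer (N : Int) (hN : 1 ≤ N) :
    ∀ (k : Nat) (a : Int), (N + 1 - a).toNat = k → 1 ≤ a →
    ∀ (U : List (List Int)), pvShape U (N + 1).toNat →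
    ∀ (r c : Nat),
    pvGet2 ((PySem.List.pyRange a (N + 1) 1).foldl (fun U i => pvSet2 U 1 i.toNat 1) U) r c
      = if r = 1 ∧ a ≤ (c : Int) ∧ (c : Int) ≤ N then 1 else pvGet2 U r c := by
  intro k
  induction k with
  | zero =>
      intro a hk ha U hU r c
      rw [PySem.List.pyRange_one_eq_nil (by omega), List.foldl_nil]
      rw [if_neg (by rintro ⟨_, h1, h2⟩; omega)]
  | succ k ih =>
      intro a hk ha U hU r c
      have hlt : a < N + 1 := by omega
      have h1 : (1 : Nat) < U.length := by rw [hU.1]; omega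
      have hrow : a.toNat < (U.getD 1 []).length := by rw [hU.2 1 (by omega)]; omega
      rw [PySem.List.pyRange_one_cons hlt, List.foldl_cons]
      rw [ih (a + 1) (by omega) (by omega) _ (pvShape_set _ _ _ _ _ hU) r c]
      by_cases hcond : r = 1 ∧ a + 1 ≤ (c : Int) ∧ (c : Int) ≤ N
      · rw [if_pos hcond, if_pos ⟨hcond.1, by omega, hcond.2.2⟩]
      · rw [if_neg hcond]
        by_cases hr : r = 1
        · subst hr
          by_cases hceq : c = a.toNat
          · subst hceq
            rw [pvGet2_set_self _ _ _ _ h1 hrow, if_pos ⟨rfl, by omega, by omega⟩]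
          · rw [pvGet2_set_ne_col _ _ _ _ _ (fun he => hceq he.symm)]
            rw [if_neg (by rintro ⟨_, hx1, hx2⟩; exact hcond ⟨rfl, by omega, hx2⟩)]
        · rw [pvGet2_set_ne_row _ _ _ _ _ _ (fun he => hr he.symm)]
          rw [if_neg (fun hx => hr hx.1)]

-- ---------- B side ----------

theorem pvPrefFold (prev : List Int) :
    ∀ (k : Nat),
    (PySem.List.pyRange 1 ((k : Int) + 1) 1).foldl
        (fun pref i => pref ++ [PySem.Int.mod (pref.getLastD 0 + prev.getD i.toNat 0) 1000000]) [0]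
      = (List.range (k + 1)).map (fun j => pvQ (fun t => prev.getD t 0) j) := by
  intro k
  induction k with
  | zero =>
      rw [show ((0 : Nat) : Int) + 1 = 1 from by norm_num,
        PySem.List.pyRange_one_eq_nil le_rfl, List.foldl_nil]
      simp [pvQ, sum1]
  | succ k ih =>
      rw [show (((k + 1 : Nat)) : Int) + 1 = ((k : Int) + 1) + 1 from by push_cast; ring]
      rw [PySem.List.pyRange_one_succ_right (by omega), List.foldl_append, ih,
        List.foldl_cons, List.foldl_nil]
      have hlast : ((List.range (k + 1)).map (fun j => pvQ (fun t => prev.getD t 0) j)).getLastD 0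
          = pvQ (fun t => prev.getD t 0) k := by
        rw [List.range_succ, List.map_append]; simp
      rw [hlast]
      have htn : ((k : Int) + 1).toNat = k + 1 := by omega
      rw [htn, pvmod]
      have hstep : (pvQ (fun t => prev.getD t 0) k + prev.getD (k + 1) 0) % 1000000
          = pvQ (fun t => prev.getD t 0) (k + 1) := by
        unfold pvQ
        rw [Int.emod_add_emod, ← sum1_succ]
      rw [hstep, List.range_succ (n := k + 1), List.map_append]
      rfl

theorem pvSS_succ (pref : List Int) (c : Nat) (a : Int) (h1 : 1 ≤ c) (hc : (c : Int) ≤ a - 1)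
    (ha : 0 < a) :
    pvSS pref c a = pvSS pref c (a - 1) + pref.getD ((a - 1).toNat) 0 := by
  unfold pvSS
  rw [show a.toNat + 1 - c = ((a - 1).toNat + 1 - c) + 1 from by omega, List.range_succ,
    List.map_append, List.sum_append]
  simp only [List.map_cons, List.map_nil, List.sum_cons, List.sum_nil, add_zero]
  rw [show c - 1 + ((a - 1).toNat + 1 - c) = (a - 1).toNat from by omega]

theorem pvSS_one (pref : List Int) (c : Nat) (a : Int) (h1 : 1 ≤ c) (hc : (c : Int) = a) :
    pvSS pref c a = pref.getD (c - 1) 0 := by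
  unfold pvSS
  rw [show a.toNat + 1 - c = 1 from by omega, List.range_one]
  simp

theorem pvCD (pref : List Int) :
    ∀ (k : Nat) (a : Int), a.toNat = k → 0 ≤ a →
    ∀ (x : Int) (lst : List Int), a < (lst.length : Int) →
    (((PySem.List.pyRange a 0 (-1)).foldl
        (fun (st : Int × List Int) a =>
          let acc := PySem.Int.mod (st.1 + pref.getD (a - 1).toNat 0) 1000000
          (acc, st.2.set a.toNat acc))
        (x % 1000000, lst)).2.length = lst.length)
    ∧ (∀ c : Nat,
      ((PySem.List.pyRange a 0 (-1)).foldl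
        (fun (st : Int × List Int) a =>
          let acc := PySem.Int.mod (st.1 + pref.getD (a - 1).toNat 0) 1000000
          (acc, st.2.set a.toNat acc))
        (x % 1000000, lst)).2.getD c 0
        = if 1 ≤ c ∧ (c : Int) ≤ a then (x + pvSS pref c a) % 1000000 else lst.getD c 0) := by
  intro k
  induction k with
  | zero =>
      intro a hk ha x lst hlen
      rw [PySem.List.pyRange_neg_one_eq_nil (by omega), List.foldl_nil]
      refine ⟨rfl, fun c => ?_⟩
      rw [if_neg (by rintro ⟨h1, h2⟩; omega)]
  | succ k ih =>
      intro a hk ha x lst hlen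
      rw [PySem.List.pyRange_neg_one_cons (by omega : (0 : Int) < a), List.foldl_cons]
      dsimp only
      rw [pvmod, Int.emod_add_emod]
      set P := pref.getD (a - 1).toNat 0 with hP
      have hlen' : a - 1 < ((lst.set a.toNat ((x + P) % 1000000)).length : Int) := by
        rw [List.length_set]; omega
      obtain ⟨ihlen, ihget⟩ := ih (a - 1) (by omega) (by omega) (x + P) _ hlen'
      refine ⟨by rw [ihlen, List.length_set], fun c => ?_⟩
      rw [ihget c]
      by_cases hc1 : 1 ≤ c ∧ (c : Int) ≤ a - 1
      · rw [if_pos hc1, if_pos ⟨hc1.1, by omega⟩,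
          pvSS_succ pref c a hc1.1 hc1.2 (by omega), ← hP]
        congr 1
        ring
      · rw [if_neg hc1]
        by_cases hceq : (c : Int) = a
        · have hca : c = a.toNat := by omega
          subst hca
          rw [pvGetD_set_self' _ _ _ _ (by omega), if_pos ⟨by omega, by omega⟩,
            pvSS_one pref _ a (by omega) hceq,
            show a.toNat - 1 = (a - 1).toNat from by omega, ← hP]
        · rw [pvGetD_set_ne _ _ _ _ _ (by omega), if_neg (by rintro ⟨h1, h2⟩; exact hc1 ⟨h1, by omega⟩)]

theorem pvBLayerD (N : Int) (hN : 3 ≤ N) (prev : List Int) :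
    (pvBLayer N prev).length = N.toNat + 1
    ∧ ∀ c : Nat, (pvBLayer N prev).getD c 0 =
        if 1 ≤ c ∧ (c : Int) ≤ N - 1
        then pvSS ((List.range (N.toNat + 1)).map (fun j => pvQ (fun t => prev.getD t 0) j)) c (N - 1) % 1000000
        else 0 := by
  unfold pvBLayer
  dsimp only
  rw [show (N : Int) + 1 = ((N.toNat : Int) + 1) from by omega]
  rw [pvPrefFold prev N.toNat]
  have hrep : ∀ c : Nat, (List.replicate (N.toNat + 1) (0 : Int)).getD c 0 = 0 := by
    intro c
    rw [List.getD_eq_getElem?_getD, List.getElem?_replicate]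
    split_ifs <;> rfl
  have hlen : (N - 1 : Int) < ((List.replicate (N.toNat + 1) (0 : Int)).length : Int) := by
    rw [List.length_replicate]; omega
  have hcd := pvCD ((List.range (N.toNat + 1)).map (fun j => pvQ (fun t => prev.getD t 0) j))
    (N - 1).toNat (N - 1) rfl (by omega) 0 (List.replicate (N.toNat + 1) 0) hlen
  rw [Int.zero_emod] at hcd
  refine ⟨by rw [hcd.1, List.length_replicate], fun c => ?_⟩
  rw [hcd.2 c]
  by_cases hc : 1 ≤ c ∧ (c : Int) ≤ N - 1
  · rw [if_pos hc, if_pos hc, zero_add]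
  · rw [if_neg hc, if_neg hc, hrep c]

-- ---------- A value = B value ----------

theorem pvInner_eq (p : Nat → Int) (b : Int) : pvInner p b = sum1 p (b - 2).toNat := by
  unfold pvInner sum1
  rw [PySem.List.pyRange_one, List.map_map,
    show b - 1 - 1 = b - 2 from by ring]
  congr 1
  apply List.map_congr_left
  intro j _
  simp only [Function.comp_def]
  congr 1
  omega

theorem pvAval_top (N : Int) (p : Nat → Int) (c : Nat) (h : N ≤ (c : Int)) :
    pvAval N p c = 0 := by
  unfold pvAval
  rw [PySem.List.pyRange_one_eq_nil (by omega)]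
  rfl

theorem pvAval_eq_BVal (N : Int) (hN : 3 ≤ N) (p : Nat → Int) (c : Nat)
    (hc : 1 ≤ c) (hc2 : (c : Int) ≤ N - 1) :
    pvAval N p c
      = pvSS ((List.range (N.toNat + 1)).map (fun j => pvQ p j)) c (N - 1) % 1000000 := by
  unfold pvAval pvSS
  rw [PySem.List.pyRange_one, List.map_map,
    show (N + 1 - ((c : Int) + 1)).toNat = N.toNat - c from by omega,
    show (N - 1).toNat + 1 - c = N.toNat - c from by omega]
  have eL : List.map ((fun b => pvInner p b) ∘ fun (k : Nat) => (c : Int) + 1 + (k : Int))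
        (List.range (N.toNat - c))
      = List.map (fun j => sum1 p (c - 1 + j)) (List.range (N.toNat - c)) := by
    apply List.map_congr_left
    intro j _
    simp only [Function.comp_def]
    rw [pvInner_eq]
    congr 1
    omega
  have eR : List.map (fun j => ((List.range (N.toNat + 1)).map (fun j => pvQ p j)).getD (c - 1 + j) 0)
        (List.range (N.toNat - c))
      = List.map (fun j => sum1 p (c - 1 + j) % 1000000) (List.range (N.toNat - c)) := by
    apply List.map_congr_left
    intro j hj
    rw [PySem.List.getD_map_range _ _ _ _ (by simp at hj; omega)]
    rfl
  rw [eL, eR,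
    show List.map (fun j => sum1 p (c - 1 + j) % 1000000) (List.range (N.toNat - c))
      = (List.map (fun j => sum1 p (c - 1 + j)) (List.range (N.toNat - c))).map
          (fun x => x % 1000000) from by rw [List.map_map]; rfl]
  exact (pvSumMod _).symm

-- ---------- the aligned main induction ----------

theorem pvMain (N : Int) (hN3 : 3 ≤ N) :
    ∀ (k : Nat) (n0 : Int), N + 2 - n0 = 2 * (k : Int) → 3 ≤ n0 → n0 % 2 = N % 2 → n0 ≤ N + 2 →
    ∀ (G : List (List Int)) (prev : List Int),
    pvShape G (N + 1).toNat → prev.length = N.toNat + 1 →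
    (∀ c : Nat, pvGet2 G (n0 - 2).toNat c = prev.getD c 0) →
    (∀ r c : Nat, n0 ≤ (r : Int) → pvGet2 G r c = 0) →
    ∀ c : Nat,
    pvGet2 ((PySem.List.pyRange n0 (N + 1) 2).foldl (pvABody N) G) N.toNat c
      = ((PySem.List.pyRange n0 (N + 1) 2).foldl (fun prev _ => pvBLayer N prev) prev).getD c 0 := by
  intro k
  induction k with
  | zero =>
      intro n0 hk h3 hpar hle G prev hshape hplen hmatch hzero c
      simp only [pyRange_two_eq_nil (show N + 1 ≤ n0 from by omega), List.foldl_nil]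
      have he : (n0 - 2).toNat = N.toNat := by omega
      rw [← he]
      exact hmatch c
  | succ k ih =>
      intro n0 hk h3 hpar hle G prev hshape hplen hmatch hzero c
      have hn0N : n0 ≤ N := by omega
      simp only [pyRange_two_cons (show n0 < N + 1 from by omega), List.foldl_cons]
      have hA := pvABody_eq N n0 h3 hn0N G hshape
        (fun c hc => hzero n0.toNat c (by omega))
      have hp : (fun i => pvGet2 G (n0 - 2).toNat i) = (fun t => prev.getD t 0) :=
        funext hmatch
      rw [hp] at hA
      obtain ⟨hlen1, hget1⟩ := pvBLayerD N (by omega) prev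
      have hmatch' : ∀ c : Nat, pvGet2 (pvABody N G n0) ((n0 + 2) - 2).toNat c
          = (pvBLayer N prev).getD c 0 := by
        intro c
        rw [show ((n0 + 2) - 2 : Int).toNat = n0.toNat from by omega, hA n0.toNat c, hget1 c]
        by_cases h1c : 1 ≤ c ∧ (c : Int) ≤ N - 1
        · rw [if_pos ⟨rfl, by omega, by omega⟩, if_pos h1c]
          exact pvAval_eq_BVal N (by omega) _ c h1c.1 h1c.2
        · rw [if_neg h1c]
          by_cases hcN : (c : Int) = N
          · rw [if_pos ⟨rfl, by omega, by omega⟩]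
            exact pvAval_top N _ c (by omega)
          · by_cases hc0 : c = 0
            · subst hc0
              rw [if_neg (by rintro ⟨_, hx, _⟩; omega)]
              exact hzero n0.toNat 0 (by omega)
            · rw [if_neg (by rintro ⟨_, _, hx⟩; omega)]
              exact hzero n0.toNat c (by omega)
      have hzero' : ∀ r c : Nat, n0 + 2 ≤ (r : Int) → pvGet2 (pvABody N G n0) r c = 0 := by
        intro r c hr
        rw [hA r c, if_neg (by rintro ⟨hx, _, _⟩; omega)]
        exact hzero r c (by omega)
      have e1 : N + 2 - (n0 + 2) = 2 * (k : Int) := by omega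
      have e2 : (3 : Int) ≤ n0 + 2 := by omega
      have e3 : (n0 + 2) % 2 = N % 2 := by omega
      have e4 : n0 + 2 ≤ N + 2 := by omega
      exact ih (n0 + 2) e1 e2 e3 e4
        (pvABody N G n0) (pvBLayer N prev) (pvABody_shape N n0 G _ hshape) hlen1
        hmatch' hzero' c

-- ---------- the four top-level cases ----------

theorem pvB_trivial (N : Int) (h : N < 3 ∨ N % 2 = 0) : zigzag_permutations_alt N = 0 := by
  unfold zigzag_permutations_alt
  rw [if_pos]
  rcases h with h | h
  · exact Or.inl h
  · exact Or.inr (by rw [pvmod2]; exact h)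

theorem pvA_nonpos (N : Int) (h : N ≤ 0) : zigzag_permutations N = 0 := by
  unfold zigzag_permutations
  simp only [pyRange_two_eq_nil (show N + 1 ≤ 3 by omega),
    PySem.List.pyRange_one_eq_nil (show N + 1 ≤ 1 by omega),
    PySem.List.pyRange_one_eq_nil (show N ≤ 1 by omega),
    PySem.List.pyRange_one_eq_nil (show N + 1 ≤ 2 by omega), List.foldl_nil]

theorem pvA_one : zigzag_permutations 1 = 0 := by decide

theorem pvFoldMod0 {α : Type} (L : List α) (g : α → Int) :
    L.foldl (fun r y => (r + g y) % 1000000) 0 = (L.map g).sum % 1000000 := by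
  have h := pvFoldMod L g 0
  rwa [Int.zero_emod, zero_add] at h

theorem pvFoldModStable {α : Type} (L : List α) (x : Int) :
    L.foldl (fun r _ => (r + 0) % 1000000) (x % 1000000) = x % 1000000 := by
  have h := pvFoldMod L (fun _ => (0 : Int)) x
  simpa using h

-- the port, written flat (definitional equality)
theorem pvA_unfold (N : Int) : zigzag_permutations N =
    (PySem.List.pyRange 2 (N + 1) 1).foldl
      (fun r i => PySem.Int.mod (r + pvGet2
        ((PySem.List.pyRange 1 (N + 1) 1).foldl (fun D i => pvSet2 D 1 i.toNat 1)
          (List.replicate (N + 1).toNat (List.replicate (N + 1).toNat 0))) N.toNat i.toNat) 1000000)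
      ((PySem.List.pyRange 1 N 1).foldl
        (fun r i => PySem.Int.mod (r + pvGet2
          ((PySem.List.pyRange 3 (N + 1) 2).foldl (pvABody N)
            ((PySem.List.pyRange 1 (N + 1) 1).foldl (fun U i => pvSet2 U 1 i.toNat 1)
              (List.replicate (N + 1).toNat (List.replicate (N + 1).toNat 0)))) N.toNat i.toNat) 1000000)
        0) := rfl

theorem pvInit_facts (N : Int) (hN : 1 ≤ N) :
    pvShape ((PySem.List.pyRange 1 (N + 1) 1).foldl (fun U i => pvSet2 U 1 i.toNat 1)
        (List.replicate (N + 1).toNat (List.replicate (N + 1).toNat 0))) (N + 1).toNat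
    ∧ ∀ r c : Nat,
      pvGet2 ((PySem.List.pyRange 1 (N + 1) 1).foldl (fun U i => pvSet2 U 1 i.toNat 1)
        (List.replicate (N + 1).toNat (List.replicate (N + 1).toNat 0))) r c
      = if r = 1 ∧ 1 ≤ (c : Int) ∧ (c : Int) ≤ N then 1 else 0 := by
  constructor
  · exact pvShape_foldl _ _ _ (fun U x hU => pvShape_set _ _ _ _ _ hU) _
      (pvShape_replicate _)
  · intro r c
    rw [pvInitLayer N hN N.toNat 1 (by omega) le_rfl _ (pvShape_replicate _) r c,
      pvGet2_replicate]

theorem pvA_even (N : Int) (h2 : 2 ≤ N) (he : N % 2 = 0) : zigzag_permutations N = 0 := by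
  rw [pvA_unfold]
  obtain ⟨hsh, hinit⟩ := pvInit_facts N (by omega)
  have hup2 : ∀ c : Nat, pvGet2
      ((PySem.List.pyRange 3 (N + 1) 2).foldl (pvABody N)
        ((PySem.List.pyRange 1 (N + 1) 1).foldl (fun U i => pvSet2 U 1 i.toNat 1)
          (List.replicate (N + 1).toNat (List.replicate (N + 1).toNat 0)))) N.toNat c = 0 := by
    intro c
    rw [pvGet2_foldl_preserve _ _ _ _ _ (fun U n hn => by
      obtain ⟨hx1, hx2, hx3⟩ := mem_pyRange_two hn
      exact pvABody_preserve N n N.toNat c (by omega) U)]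
    rw [hinit N.toNat c, if_neg (by rintro ⟨hx, _, _⟩; omega)]
  have h0 : (PySem.List.pyRange 1 N 1).foldl
      (fun r i => PySem.Int.mod (r + pvGet2
        ((PySem.List.pyRange 3 (N + 1) 2).foldl (pvABody N)
          ((PySem.List.pyRange 1 (N + 1) 1).foldl (fun U i => pvSet2 U 1 i.toNat 1)
            (List.replicate (N + 1).toNat (List.replicate (N + 1).toNat 0)))) N.toNat i.toNat) 1000000)
      0 = 0 := by
    refine Eq.trans (PySem.List.foldl_congr_mem _ _ (fun r (_ : Int) => (r + 0) % 1000000) _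
      (fun acc x _ => by rw [pvmod, hup2 x.toNat])) ?_
    have h := pvFoldModStable (PySem.List.pyRange 1 N 1) 0
    rwa [Int.zero_emod] at h
  rw [h0]
  refine Eq.trans (PySem.List.foldl_congr_mem _ _ (fun r (_ : Int) => (r + 0) % 1000000) _
    (fun acc x _ => by rw [pvmod, hinit N.toNat x.toNat, if_neg (by rintro ⟨hx, _, _⟩; omega)])) ?_
  have h := pvFoldModStable (PySem.List.pyRange 2 (N + 1) 1) 0
  rwa [Int.zero_emod] at h

theorem pvB_unfold (N : Int) (h : ¬(N < 3 ∨ PySem.Int.mod N 2 = 0)) :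
    zigzag_permutations_alt N =
    (PySem.List.pyRange 1 N 1).foldl
      (fun r i => PySem.Int.mod (r + ((PySem.List.pyRange 3 (N + 1) 2).foldl
          (fun prev _ => pvBLayer N prev) (0 :: List.replicate N.toNat 1)).getD i.toNat 0) 1000000)
      0 := by
  rw [zigzag_permutations_alt, if_neg h]

theorem pvAB_odd (N : Int) (h3 : 3 ≤ N) (hodd : N % 2 = 1) :
    zigzag_permutations N = zigzag_permutations_alt N := by
  rw [pvA_unfold, pvB_unfold N (by
    rintro (hx | hx)
    · omega
    · rw [pvmod2] at hx; omega)]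
  obtain ⟨hsh, hinit⟩ := pvInit_facts N (by omega)
  have hmatch : ∀ c : Nat,
      pvGet2 ((PySem.List.pyRange 1 (N + 1) 1).foldl (fun U i => pvSet2 U 1 i.toNat 1)
        (List.replicate (N + 1).toNat (List.replicate (N + 1).toNat 0))) ((3 : Int) - 2).toNat c
      = (0 :: List.replicate N.toNat 1).getD c 0 := by
    intro c
    rw [show ((3 : Int) - 2).toNat = 1 from rfl, hinit 1 c]
    cases c with
    | zero => rw [if_neg (by rintro ⟨_, hx, _⟩; omega)]; rfl
    | succ c' =>
        rw [List.getD_cons_succ, List.getD_eq_getElem?_getD, List.getElem?_replicate]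
        by_cases hc : c' < N.toNat
        · rw [if_pos ⟨rfl, by omega, by omega⟩, if_pos hc]; rfl
        · rw [if_neg (by rintro ⟨_, _, hx⟩; omega), if_neg hc]; rfl
  have hzero : ∀ r c : Nat, (3 : Int) ≤ (r : Int) →
      pvGet2 ((PySem.List.pyRange 1 (N + 1) 1).foldl (fun U i => pvSet2 U 1 i.toNat 1)
        (List.replicate (N + 1).toNat (List.replicate (N + 1).toNat 0))) r c = 0 := by
    intro r c hr
    rw [hinit r c, if_neg (by rintro ⟨hx, _, _⟩; omega)]
  have key := pvMain N h3 ((N - 1) / 2).toNat 3 (by omega) (by norm_num) (by omega) (by omega)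
    _ _ hsh (by simp) hmatch hzero
  have h0 : (PySem.List.pyRange 1 N 1).foldl
      (fun r i => PySem.Int.mod (r + pvGet2
        ((PySem.List.pyRange 3 (N + 1) 2).foldl (pvABody N)
          ((PySem.List.pyRange 1 (N + 1) 1).foldl (fun U i => pvSet2 U 1 i.toNat 1)
            (List.replicate (N + 1).toNat (List.replicate (N + 1).toNat 0)))) N.toNat i.toNat) 1000000)
      0
      = (PySem.List.pyRange 1 N 1).foldl
        (fun r i => PySem.Int.mod (r + ((PySem.List.pyRange 3 (N + 1) 2).foldl
            (fun prev _ => pvBLayer N prev) (0 :: List.replicate N.toNat 1)).getD i.toNat 0) 1000000)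
        0 := by
    exact PySem.List.foldl_congr_mem _ _ _ _ (fun acc x _ => by rw [key x.toNat])
  rw [h0]
  simp only [pvmod]
  rw [pvFoldMod0 (PySem.List.pyRange 1 N 1)
    (g := fun i => ((PySem.List.pyRange 3 (N + 1) 2).foldl
      (fun prev _ => pvBLayer N prev) (0 :: List.replicate N.toNat 1)).getD i.toNat 0)]
  refine Eq.trans (PySem.List.foldl_congr_mem _ _ (fun r (_ : Int) => (r + 0) % 1000000) _
    (fun acc x _ => by
      rw [hinit N.toNat x.toNat, if_neg (by rintro ⟨hx, _, _⟩; omega)])) ?_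
  exact pvFoldModStable (PySem.List.pyRange 2 (N + 1) 1) _

-- ===== VERDICT (by name: the statement is the Claim_ definition above) =====
theorem zigzag_permutations_spec : Claim_equal_zigzag_permutations := by
  intro N _
  unfold Spec_zigzag_permutations
  by_cases h3 : N < 3
  · rw [pvB_trivial N (Or.inl h3)]
    by_cases h0 : N ≤ 0
    · exact pvA_nonpos N h0
    · interval_cases N
      · exact pvA_one
      · exact pvA_even 2 (by norm_num) (by norm_num)
  · have h2 : N % 2 = 0 ∨ N % 2 = 1 := by omega
    rcases h2 with he | ho
    · rw [pvB_trivial N (Or.inr he), pvA_even N (by omega) he]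
    · exact pvAB_odd N (by omega) ho
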